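-- pv_equiv track=rewrite | github.com/Espresso0org/Generator | Main2.py | calculate_address_position
-- ===== SOURCE A (Python) =====
-- def calculate_address_position(address):
--     characters = "123456789ABCDEFGHJKLMNPQRSTUVWXYZabcdefghijkmnopqrstuvwxyz"
--     base = len(characters)
--     position = 0
--     power = 1
--
--     for i in range(len(address) - 1, -1, -1):
--         char = address[i]
--         digit = characters.index(char)
--         position += digit * power
--         power *= base
--
--     return position
-- ===== SOURCE B (Python) =====
-- def calculate_address_position(address):
--     characters = "123456789ABCDEFGHJKLMNPQRSTUVWXYZabcdefghijkmnopqrstuvwxyz"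
--     base = len(characters)
--     digits = [characters.index(char) for char in address]
--     powers = [1]
--     for _ in digits[1:]:
--         powers.append(powers[-1] * base)
--     return sum(d * p for d, p in zip(digits, reversed(powers)))
-- ===== Notes on version B (the rewrite author's own statement) =====
-- stated objective: alternative
-- what changed: Replaces A's single backwards loop carrying a running power inside the accumulator by three staged passes: map every character to its digit, build the table of powers of the base, then sum the products of the digit list zipped with the reversed power table.
import Mathlib
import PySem

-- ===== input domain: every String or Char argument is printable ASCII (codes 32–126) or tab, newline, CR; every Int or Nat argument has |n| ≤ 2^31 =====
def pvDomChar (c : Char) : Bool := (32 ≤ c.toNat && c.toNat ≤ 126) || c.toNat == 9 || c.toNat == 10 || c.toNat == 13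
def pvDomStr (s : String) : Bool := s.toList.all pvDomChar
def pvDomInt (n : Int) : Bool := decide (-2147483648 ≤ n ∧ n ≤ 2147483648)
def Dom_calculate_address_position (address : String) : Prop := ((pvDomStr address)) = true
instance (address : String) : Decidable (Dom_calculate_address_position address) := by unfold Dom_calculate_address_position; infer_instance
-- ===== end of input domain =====

-- B replaces A's backwards loop carrying a running power inside the accumulator by three staged
-- passes: map chars to digits, build the power table, sum the zip of digits with reversed powers.

-- ===== PORT A =====
-- A iterates i = len-1 … 0, i.e. over the reversed string, keeping (position, power);
-- characters.index(char) is PySem.List.index? on the alphabet (none = ValueError, excluded by Pre_;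
-- .getD 0 is never reached under Pre_).
def calculate_address_position (address : String) : Int :=
  let characters := "123456789ABCDEFGHJKLMNPQRSTUVWXYZabcdefghijkmnopqrstuvwxyz"
  let base : Int := (characters.toList.length : Int)
  let st := address.toList.reverse.foldl
    (fun (st : Int × Int) ch =>
      (st.1 + (((PySem.List.index? characters.toList ch).getD 0 : Nat) : Int) * st.2, st.2 * base))
    (0, 1)
  st.1

-- ===== PORT B =====
-- Source B: digit list comprehension; a loop growing the power table powers (powers[-1] is
-- PySem.List.pyGet? powers (-1), always some under the loop invariant, .getD 0 unreachable);
-- then the sum of products of digits zipped with reversed(powers).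
def calculate_address_position_alt (address : String) : Int :=
  let characters := "123456789ABCDEFGHJKLMNPQRSTUVWXYZabcdefghijkmnopqrstuvwxyz"
  let base : Int := (characters.toList.length : Int)
  let digits : List Int :=
    address.toList.map (fun ch => (((PySem.List.index? characters.toList ch).getD 0 : Nat) : Int))
  let powers : List Int := (digits.drop 1).foldl
    (fun (powers : List Int) _ => powers ++ [((PySem.List.pyGet? powers (-1)).getD 0) * base])
    [1]
  ((digits.zip powers.reverse).map (fun q => q.1 * q.2)).sum

-- ===== PRECONDITION & SPEC =====
-- Pre_ excludes exactly the inputs where characters.index raises ValueError in A (a character outside the base-58 alphabet).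
def Pre_calculate_address_position (address : String) : Prop :=
  address.toList.all
    (fun c => "123456789ABCDEFGHJKLMNPQRSTUVWXYZabcdefghijkmnopqrstuvwxyz".toList.contains c) = true
instance (address : String) : Decidable (Pre_calculate_address_position address) := by
  unfold Pre_calculate_address_position; infer_instance

def pvWitness_calculate_address_position : String := "1A7z"

def Spec_calculate_address_position (address : String) (out : Int) : Prop := out = calculate_address_position_alt address
instance (address : String) (out : Int) : Decidable (Spec_calculate_address_position address out) := by unfold Spec_calculate_address_position; infer_instance

-- ===== CLAIM (what is proved, stated in full; the proofs are below) =====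
def Claim_equal_calculate_address_position : Prop := ∀ (address : String), Dom_calculate_address_position address → Pre_calculate_address_position address → Spec_calculate_address_position address (calculate_address_position address)

-- ===== LEMMAS AND PROOFS =====

-- Rewriting the exponent of a truncated-Int power.
theorem pow_toNat_congr (b : Int) {i j : Int} (h : i = j) : b ^ i.toNat = b ^ j.toNat := by rw [h]

-- The enumerated-sum is independent of the start index once the exponent is offset accordingly.
theorem enum_sum_shift (b : Int) (l : List Int) : ∀ s : Int,
    ((PySem.List.enumerate l s).map (fun p => p.2 * b ^ ((l.length : Int) + s - 1 - p.1).toNat)).sum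
      = ((PySem.List.enumerate l 0).map (fun p => p.2 * b ^ ((l.length : Int) - 1 - p.1).toNat)).sum := by
  induction l with
  | nil => intro s; simp [PySem.List.enumerate_nil]
  | cons x xs ih =>
    intro s
    rw [PySem.List.enumerate_cons, PySem.List.enumerate_cons]
    simp only [List.map_cons, List.sum_cons, List.length_cons]
    congr 1
    · exact congrArg (fun z => x * z) (pow_toNat_congr b (by omega))
    · calc (List.map (fun p : Int × Int => p.2 * b ^ ((((xs.length + 1 : Nat)) : Int) + s - 1 - p.1).toNat)
              (PySem.List.enumerate xs (s + 1))).sum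
          = (List.map (fun p : Int × Int => p.2 * b ^ ((xs.length : Int) + (s + 1) - 1 - p.1).toNat)
              (PySem.List.enumerate xs (s + 1))).sum := by
            refine congrArg List.sum (List.map_congr_left ?_); intro p _
            exact congrArg (fun z => p.2 * z) (pow_toNat_congr b (by push_cast; ring))
        _ = (List.map (fun p : Int × Int => p.2 * b ^ ((xs.length : Int) - 1 - p.1).toNat)
              (PySem.List.enumerate xs 0)).sum := ih (s + 1)
        _ = (List.map (fun p : Int × Int => p.2 * b ^ ((xs.length : Int) + 1 - 1 - p.1).toNat)
              (PySem.List.enumerate xs 1)).sum := (ih 1).symm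
        _ = (List.map (fun p : Int × Int => p.2 * b ^ ((((xs.length + 1 : Nat)) : Int) - 1 - p.1).toNat)
              (PySem.List.enumerate xs 1)).sum := by
            refine congrArg List.sum (List.map_congr_left ?_); intro p _
            exact congrArg (fun z => p.2 * z) (pow_toNat_congr b (by push_cast; ring))

-- B's enumerated sum over c :: t equals c * b^|t| plus the sum over t.
theorem enum_sum_cons (b c : Int) (t : List Int) :
    ((PySem.List.enumerate (c :: t)).map
        (fun p => p.2 * b ^ (((c :: t).length : Int) - 1 - p.1).toNat)).sum
      = c * b ^ t.length +
        ((PySem.List.enumerate t).map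
          (fun p => p.2 * b ^ ((t.length : Int) - 1 - p.1).toNat)).sum := by
  rw [PySem.List.enumerate_cons]
  simp only [List.map_cons, List.sum_cons, List.length_cons]
  congr 1
  · have h : ((((t.length + 1 : Nat)) : Int) - 1 - 0).toNat = t.length := by omega
    rw [h]
  · calc (List.map (fun p : Int × Int => p.2 * b ^ ((((t.length + 1 : Nat)) : Int) - 1 - p.1).toNat)
            (PySem.List.enumerate t 1)).sum
        = (List.map (fun p : Int × Int => p.2 * b ^ ((t.length : Int) + 1 - 1 - p.1).toNat)
            (PySem.List.enumerate t 1)).sum := by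
          refine congrArg List.sum (List.map_congr_left ?_); intro p _
          exact congrArg (fun z => p.2 * z) (pow_toNat_congr b (by push_cast; ring))
      _ = (List.map (fun p : Int × Int => p.2 * b ^ ((t.length : Int) - 1 - p.1).toNat)
            (PySem.List.enumerate t 0)).sum := enum_sum_shift b t 1

-- A's reversed fold from a general state, expressed with B's enumerated sum over the digit list.
theorem rev_fold_eq_enum_sum (d : Char → Int) (b : Int) (l : List Char) (p w : Int) :
    l.reverse.foldl (fun (st : Int × Int) ch => (st.1 + d ch * st.2, st.2 * b)) (p, w)
      = (p + ((PySem.List.enumerate (l.map d)).map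
            (fun q => q.2 * b ^ (((l.map d).length : Int) - 1 - q.1).toNat)).sum * w,
         w * b ^ l.length) := by
  induction l generalizing p w with
  | nil => simp [PySem.List.enumerate_nil]
  | cons c t ih =>
    rw [List.reverse_cons, List.foldl_append]
    simp only [List.foldl_cons, List.foldl_nil]
    rw [ih, List.map_cons, enum_sum_cons]
    simp only [List.length_cons, List.length_map]
    exact Prod.ext (by push_cast; ring) (by ring)

-- B's power-table loop, started at the table of powers b^0 … b^k, extends it one power per step.
theorem pows_build (b : Int) (l : List Int) : ∀ k : Nat,
    l.foldl (fun (powers : List Int) _ => powers ++ [((PySem.List.pyGet? powers (-1)).getD 0) * b])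
        ((List.range (k + 1)).map (fun j => b ^ j))
      = (List.range (k + 1 + l.length)).map (fun j => b ^ j) := by
  induction l with
  | nil => intro k; simp
  | cons x t ih =>
    intro k
    rw [List.foldl_cons]
    have hsplit : (List.range (k + 1)).map (fun j => b ^ j)
        = (List.range k).map (fun j => b ^ j) ++ [b ^ k] := by
      rw [List.range_succ, List.map_append]; simp
    rw [hsplit, PySem.List.pyGet?_neg_one_append_singleton]
    simp only [Option.getD_some]
    have hjoin : (List.range k).map (fun j => b ^ j) ++ [b ^ k] ++ [b ^ k * b]
        = (List.range (k + 1 + 1)).map (fun j => b ^ j) := by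
      rw [show k + 1 + 1 = (k + 1) + 1 from rfl, List.range_succ, List.map_append,
        List.range_succ, List.map_append]
      simp [pow_succ]
    rw [hjoin, ih (k + 1)]
    simp only [List.length_cons]
    have h2 : k + 1 + 1 + t.length = k + 1 + (t.length + 1) := by omega
    rw [h2]

-- The zipped product sum of a list with the reversed power table equals B's enumerated sum.
theorem zip_rev_pows_sum (b : Int) (l : List Int) :
    ((l.zip (((List.range ((l.length - 1) + 1)).map (fun j => b ^ j)).reverse)).map
        (fun q => q.1 * q.2)).sum
      = ((PySem.List.enumerate l).map
          (fun p => p.2 * b ^ ((l.length : Int) - 1 - p.1).toNat)).sum := by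
  induction l with
  | nil => simp [PySem.List.enumerate_nil]
  | cons c t ih =>
    rw [show ((c :: t).length - 1) + 1 = t.length + 1 from by simp, List.range_succ,
      List.map_append, List.reverse_append]
    simp only [List.map_cons, List.map_nil, List.reverse_cons, List.reverse_nil, List.nil_append,
      List.singleton_append, List.zip_cons_cons, List.sum_cons]
    rw [enum_sum_cons]
    have htail : (List.map (fun q : Int × Int => q.1 * q.2)
          (t.zip ((List.map (fun j => b ^ j) (List.range t.length)).reverse))).sum
        = (List.map (fun p : Int × Int => p.2 * b ^ ((t.length : Int) - 1 - p.1).toNat)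
            (PySem.List.enumerate t)).sum := by
      by_cases ht : t = []
      · subst ht; simp [PySem.List.enumerate_nil]
      · have hp : 0 < t.length := List.length_pos_iff.mpr ht
        have h1 : t.length - 1 + 1 = t.length := by omega
        rw [h1] at ih
        exact ih
    rw [htail]

-- ===== VERDICT (by name: the statement is the Claim_ definition above) =====
theorem calculate_address_position_spec : Claim_equal_calculate_address_position := by
  intro address _ _
  unfold Spec_calculate_address_position calculate_address_position calculate_address_position_alt
  simp only []
  rw [rev_fold_eq_enum_sum]
  rw [show ([(1 : Int)]) = (List.range (0 + 1)).map (fun j => ("123456789ABCDEFGHJKLMNPQRSTUVWXYZabcdefghijkmnopqrstuvwxyz".toList.length : Int) ^ j) from by simp]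
  rw [pows_build]
  rw [show (0 + 1 + ((address.toList.map (fun ch => (((PySem.List.index? "123456789ABCDEFGHJKLMNPQRSTUVWXYZabcdefghijkmnopqrstuvwxyz".toList ch).getD 0 : Nat) : Int))).drop 1).length)
        = (((address.toList.map (fun ch => (((PySem.List.index? "123456789ABCDEFGHJKLMNPQRSTUVWXYZabcdefghijkmnopqrstuvwxyz".toList ch).getD 0 : Nat) : Int))).length - 1) + 1)
      from by simp; omega]
  rw [zip_rev_pows_sum]
  push_cast
  ring
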